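-- pv_equiv track=rewrite | github.com/lakazatong/dice_problem | solve.py | find_combinations_generalised
-- ===== SOURCE A (Python) =====
-- def find_combinations_generalised(sets, target_sum, t):
-- 	result = set()
--
-- 	def backtrack(start, current_combination, current_sum):
-- 		if len(current_combination) == t:
-- 			if current_sum == target_sum:
-- 				result.add(tuple(current_combination))
-- 			return
--
-- 		for i in range(start, len(sets)):
-- 			# new for loop here
-- 			for v in sets[i]:
-- 				current_combination.append(v)
-- 				backtrack(i + 1, current_combination, current_sum + v)
-- 				current_combination.pop()
--
-- 	backtrack(0, [], 0)
-- 	return result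
-- ===== SOURCE B (Python) =====
-- def find_combinations_generalised(sets, target_sum, t):
-- 	# Iterative level-by-level expansion instead of recursive backtracking:
-- 	# each state is (value-tuple so far, next allowed set index, running sum).
-- 	states = [((), 0, 0)]
-- 	k = t
-- 	while k > 0 and states:
-- 		states = [(c + (v,), i + 1, s + v)
-- 		          for (c, start, s) in states
-- 		          for i in range(start, len(sets))
-- 		          for v in sets[i]]
-- 		k -= 1
-- 	return {c for (c, _, s) in states if s == target_sum and len(c) == t}
-- ===== Notes on version B (the rewrite author's own statement) =====
-- stated objective: alternative
-- what changed: Replaces the recursive DFS backtracking with mutable state by an iterative level-by-level (BFS) expansion of partial states (tuple, next index, sum), t rounds of a list comprehension, then one final filter-into-set pass.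
import Mathlib
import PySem

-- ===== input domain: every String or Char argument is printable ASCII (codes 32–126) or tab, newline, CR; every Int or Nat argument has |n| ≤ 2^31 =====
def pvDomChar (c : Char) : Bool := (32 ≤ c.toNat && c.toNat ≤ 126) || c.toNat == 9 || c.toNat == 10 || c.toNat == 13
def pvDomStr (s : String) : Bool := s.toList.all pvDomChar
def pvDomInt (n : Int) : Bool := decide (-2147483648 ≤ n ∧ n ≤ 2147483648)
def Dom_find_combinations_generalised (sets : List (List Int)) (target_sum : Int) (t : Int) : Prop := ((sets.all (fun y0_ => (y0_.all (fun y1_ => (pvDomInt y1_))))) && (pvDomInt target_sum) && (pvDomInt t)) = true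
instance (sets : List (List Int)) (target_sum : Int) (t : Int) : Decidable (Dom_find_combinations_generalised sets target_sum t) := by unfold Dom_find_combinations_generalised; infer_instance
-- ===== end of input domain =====

-- B replaces A's recursive backtracking by an iterative level-by-level expansion of
-- partial states; same exponential enumeration, different decomposition (objective: alternative).

-- ===== PORT A =====
-- A's inner recursive 'backtrack'; the fuel argument only bounds the recursion depth
-- (the depth is at most sets.length - start + 1, so the fuel given below is never exhausted).
def pvBT (sets : List (List Int)) (target_sum t : Int) :
    Nat → Nat → List Int → Int → PySem.Set (List Int) → PySem.Set (List Int)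
  | 0, _, _, _, res => res
  | fuel+1, start, comb, csum, res =>
    if (comb.length : Int) = t then
      (if csum = target_sum then PySem.Set.add res comb else res)
    else
      (List.range' start (sets.length - start)).foldl
        (fun r i => (sets.getD i []).foldl
          (fun r v => pvBT sets target_sum t fuel (i+1) (comb ++ [v]) (csum + v) r) r) res

def find_combinations_generalised (sets : List (List Int)) (target_sum : Int) (t : Int) : List (List Int) :=
  pvBT sets target_sum t (sets.length + 1) 0 [] 0 PySem.Set.empty

-- ===== PORT B =====
-- one comprehension round: expand every state by one more (index, value) choice
def pvStep (sets : List (List Int)) (states : List (List Int × Nat × Int)) : List (List Int × Nat × Int) :=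
  states.flatMap (fun cs =>
    (List.range' cs.2.1 (sets.length - cs.2.1)).flatMap (fun i =>
      (sets.getD i []).map (fun v => (cs.1 ++ [v], i + 1, cs.2.2 + v))))

-- the 'while k > 0 and states' loop (k counts down from t, so it runs t.toNat times at most)
def pvLoopB (sets : List (List Int)) : Nat → List (List Int × Nat × Int) → List (List Int × Nat × Int)
  | 0, states => states
  | k+1, states => if states = [] then states else pvLoopB sets k (pvStep sets states)

def find_combinations_generalised_alt (sets : List (List Int)) (target_sum : Int) (t : Int) : List (List Int) :=
  let states := pvLoopB sets t.toNat [([], 0, 0)]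
  states.foldl
    (fun (r : PySem.Set (List Int)) cs =>
      if cs.2.2 = target_sum ∧ (cs.1.length : Int) = t then PySem.Set.add r cs.1 else r)
    PySem.Set.empty

-- ===== PRECONDITION & SPEC =====
def Spec_find_combinations_generalised (sets : List (List Int)) (target_sum : Int) (t : Int) (out : List (List Int)) : Prop := out = find_combinations_generalised_alt sets target_sum t
instance (sets : List (List Int)) (target_sum : Int) (t : Int) (out : List (List Int)) : Decidable (Spec_find_combinations_generalised sets target_sum t out) := by unfold Spec_find_combinations_generalised; infer_instance

-- ===== CLAIM (what is proved, stated in full; the proofs are below) =====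
def Claim_equal_find_combinations_generalised : Prop := ∀ (sets : List (List Int)) (target_sum : Int) (t : Int), Dom_find_combinations_generalised sets target_sum t → Spec_find_combinations_generalised sets target_sum t (find_combinations_generalised sets target_sum t)

-- ===== LEMMAS AND PROOFS =====

-- DFS enumeration of A's completed (combination, sum) pairs, in A's visit order
def pvDFS (sets : List (List Int)) (t : Int) :
    Nat → Nat → List Int → Int → List (List Int × Int)
  | 0, _, _, _ => []
  | fuel+1, start, comb, csum =>
    if (comb.length : Int) = t then [(comb, csum)]
    else
      (List.range' start (sets.length - start)).flatMap (fun i =>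
        (sets.getD i []).flatMap (fun v => pvDFS sets t fuel (i+1) (comb ++ [v]) (csum + v)))

theorem pv_foldl_flatMap {α β γ : Type} (l : List α) (f : α → List β) (g : γ → β → γ) (init : γ) :
    (l.flatMap f).foldl g init = l.foldl (fun acc x => (f x).foldl g acc) init := by
  induction l generalizing init with
  | nil => rfl
  | cons a l ih => simp [List.flatMap_cons, List.foldl_append, ih]

theorem pvBT_eq_dfs (sets : List (List Int)) (ts t : Int) (fuel : Nat) :
    ∀ (start : Nat) (comb : List Int) (csum : Int) (res : PySem.Set (List Int)),
    pvBT sets ts t fuel start comb csum res =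
      (pvDFS sets t fuel start comb csum).foldl
        (fun r p => if p.2 = ts then PySem.Set.add r p.1 else r) res := by
  induction fuel with
  | zero => intro start comb csum res; rfl
  | succ fuel ih =>
    intro start comb csum res
    simp only [pvBT, pvDFS]
    split
    · rename_i h; split <;> simp [List.foldl_cons, *]
    · rw [pv_foldl_flatMap]
      apply PySem.List.foldl_congr_mem
      intro r i _
      rw [pv_foldl_flatMap]
      apply PySem.List.foldl_congr_mem
      intro r v _
      exact ih _ _ _ _

theorem pvDFS_length (sets : List (List Int)) (t : Int) (fuel : Nat) :
    ∀ (start : Nat) (comb : List Int) (csum : Int) (p : List Int × Int),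
    p ∈ pvDFS sets t fuel start comb csum → (p.1.length : Int) = t := by
  induction fuel with
  | zero => intro _ _ _ _ h; simp [pvDFS] at h
  | succ fuel ih =>
    intro start comb csum p hp
    simp only [pvDFS] at hp
    split at hp
    · rename_i h; simp at hp; subst hp; simpa using h
    · simp only [List.mem_flatMap] at hp
      obtain ⟨i, _, v, _, hmem⟩ := hp
      exact ih _ _ _ _ hmem

-- step^k, without the early-exit check of pvLoopB
def pvIter (sets : List (List Int)) : Nat → List (List Int × Nat × Int) → List (List Int × Nat × Int)
  | 0, s => s
  | k+1, s => pvIter sets k (pvStep sets s)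

theorem pvIter_nil (sets : List (List Int)) (k : Nat) : pvIter sets k [] = [] := by
  induction k with
  | zero => rfl
  | succ k ih => simpa [pvIter, pvStep] using ih

theorem pvLoopB_eq_iter (sets : List (List Int)) (k : Nat) :
    ∀ s, pvLoopB sets k s = pvIter sets k s := by
  induction k with
  | zero => intro s; rfl
  | succ k ih =>
    intro s
    simp only [pvLoopB, pvIter]
    split
    · rename_i h; subst h
      have hs : pvStep sets [] = [] := by simp [pvStep]
      rw [hs, pvIter_nil]
    · exact ih _

theorem pvIter_append (sets : List (List Int)) (k : Nat) :
    ∀ xs ys, pvIter sets k (xs ++ ys) = pvIter sets k xs ++ pvIter sets k ys := by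
  induction k with
  | zero => intro xs ys; rfl
  | succ k ih => intro xs ys; simp only [pvIter, pvStep, List.flatMap_append]; exact ih _ _

theorem pvIter_flatMap {α : Type} (sets : List (List Int)) (k : Nat) (l : List α)
    (f : α → List (List Int × Nat × Int)) :
    pvIter sets k (l.flatMap f) = l.flatMap (fun x => pvIter sets k (f x)) := by
  induction l with
  | nil => simp [pvIter_nil]
  | cons a l ih => simp [List.flatMap_cons, pvIter_append, ih]

theorem pvDFS_eq_iter (sets : List (List Int)) (t : Int) (k : Nat) :
    ∀ (fuel start : Nat) (comb : List Int) (csum : Int),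
    sets.length - start < fuel → (comb.length : Int) + k = t →
    pvDFS sets t fuel start comb csum =
      (pvIter sets k [(comb, start, csum)]).map (fun p => (p.1, p.2.2)) := by
  induction k with
  | zero =>
    intro fuel start comb csum hfuel hlen
    obtain ⟨fuel, rfl⟩ : ∃ f, fuel = f + 1 := ⟨fuel - 1, by omega⟩
    simp only [pvDFS, pvIter]
    rw [if_pos (by omega)]
    rfl
  | succ k ih =>
    intro fuel start comb csum hfuel hlen
    obtain ⟨fuel, rfl⟩ : ∃ f, fuel = f + 1 := ⟨fuel - 1, by omega⟩
    simp only [pvDFS, pvIter]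
    rw [if_neg (by omega)]
    have hstep : pvStep sets [(comb, start, csum)] =
        (List.range' start (sets.length - start)).flatMap (fun i =>
          (sets.getD i []).flatMap (fun v => [(comb ++ [v], i + 1, csum + v)])) := by
      simp [pvStep, List.map_eq_flatMap]
    rw [hstep, pvIter_flatMap, List.map_flatMap]
    refine List.flatMap_congr (fun i hi => ?_)
    rw [pvIter_flatMap, List.map_flatMap]
    refine List.flatMap_congr (fun v _ => ?_)
    have hi' := List.mem_range'_1.mp hi
    refine ih fuel (i+1) (comb ++ [v]) (csum + v) (by omega) ?_
    simp only [List.length_append, List.length_cons, List.length_nil]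
    push_cast
    omega

theorem pvDFS_neg (sets : List (List Int)) (t : Int) (ht : t < 0) (fuel : Nat) :
    ∀ (start : Nat) (comb : List Int) (csum : Int),
    pvDFS sets t fuel start comb csum = [] := by
  induction fuel with
  | zero => intro _ _ _; rfl
  | succ fuel ih =>
    intro start comb csum
    simp only [pvDFS]
    rw [if_neg (by omega)]
    simp [ih]

-- ===== VERDICT (by name: the statement is the Claim_ definition above) =====
theorem find_combinations_generalised_spec : Claim_equal_find_combinations_generalised := by
  intro sets ts t _
  unfold Spec_find_combinations_generalised
  unfold find_combinations_generalised find_combinations_generalised_alt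
  rw [pvBT_eq_dfs, pvLoopB_eq_iter]
  by_cases ht : 0 ≤ t
  · have hdfs := pvDFS_eq_iter sets t t.toNat (sets.length + 1) 0 [] 0
      (by omega) (by simp; omega)
    rw [hdfs, List.foldl_map]
    apply PySem.List.foldl_congr_mem
    intro r p hp
    have hlen : ((p.1, p.2.2).1.length : Int) = t := by
      refine pvDFS_length sets t (sets.length + 1) 0 [] 0 (p.1, p.2.2) ?_
      rw [hdfs]; exact List.mem_map_of_mem hp
    simp only at hlen
    by_cases hs : p.2.2 = ts
    · rw [if_pos hs, if_pos ⟨hs, hlen⟩]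
    · rw [if_neg hs, if_neg (by tauto)]
  · have h0 : t.toNat = 0 := by omega
    rw [pvDFS_neg sets t (by omega), h0]
    simp only [pvIter, List.foldl_cons, List.foldl_nil]
    rw [if_neg (by simp; omega)]
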